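-- pv_equiv track=rewrite | github.com/afsc19/JogoMNK-FP-1 | FP2425P1.py | obtem_diagonal
-- ===== SOURCE A (Python) =====
-- def obtem_dimensao(tab):
--     """
--     obtem_dimensao: tabuleiro → tuplo
--     Devolve um tuplo formado pelo nº de linhas e pelo nº de colunas do tabuleiro recebido no argumento.
--     """
--
--     # Como o tabuleiro é constituido por um tuplo de tuplos, em que cada tuplo contido no primeiro representam filas,
--     # o nº de colunas pode ser dado pelo tamanho do primeiro tuplo, ou seja, pela contagem das filas neste contidas.
--     m = len(tab)
--
--     # Considerando que os tamanhos de cada fila são iguais no tabuleiro inteiro, (após eh_tabuleiro),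
--     # Para obter o nº de colunas basta calcular o tamanho de um das filas (a fila 0 estará sempre presente, dado que n >= 2).
--     n = len(tab[0])
--     return (m, n)
--
-- def obtem_diagonal(tab, pos):
--     """
--     obtem_diagonal: tabuleiro × posicao → tuplo
--
--     Recebe um tabuleiro e uma posição.
--     Devolve um tuplo com as posições da diagonal à qual a posição pertence.
--     """
--     # Calcular o nº total de linhas e de colunas
--     m, n = obtem_dimensao(tab)
--     # Calcular a linha e a coluna da posição
--     linha = qual_linha(tab, pos)
--     col = qual_coluna(tab, pos)
--
--     # Se a posição recebida estiver mais perto da primeira coluna do que da primeira fila,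
--     # a coluna passa a ser zero e a linha é subtraída pela coluna original.
--     if linha >= col:
--         col, linha = 0, linha - col
--     else:
--         # Caso contrário, se a posição recebida estiver mais perto da primeira linha:
--         # A linha passa a ser zero,
--         # e a coluna é subtraída pela linha original.
--         linha, col = 0, col - linha
--
--     # Calcula e adiciona a posição nessa linha e coluna.
--     # (+1 dado que as posições começam no 1, enquanto os índices das colunas começam no 0)
--     diagonal = (linha * n + col + 1,)
--
--     # Enquanto ainda não tiver adicionado uma posição da última linha ou da última coluna:
--     while diagonal[-1] <= n * (m - 1) and diagonal[-1] % n > 0: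
--         # A próxima diagonal será dada pela linha abaixo (+n) e pela coluna seguinte (+1).
--         diagonal += (diagonal[-1] + n + 1,)
--
--     return diagonal
--
-- def qual_coluna(tab, pos):
--     """
--     qual_coluna: tabuleiro × posicao → inteiro
--
--     Recebe um tabuleiro e uma posicao do tabuleiro.
--     Devolve o índice da coluna na qual está contida a posição recebida.
--     """
--     n = obtem_dimensao(tab)[1]
--     # O resto da divisão da posição-1 pelo nº de colunas dá o nº da coluna onde esta se insere.
--     return (pos - 1) % n
--
-- def qual_linha(tab, pos):
--     """
--     qual_coluna: tabuleiro × posicao → inteiro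
--
--     Recebe um tabuleiro e uma posicao do tabuleiro.
--     Devolve o índice da linha na qual está contida a posição recebida.
--     """
--     n = obtem_dimensao(tab)[1]
--     # A divisão inteira da posição pelo nº de colunas dá o nº de filas (cada fila tem ncolunas) onde esta se insere.
--     # Como as posições começam no 1 e os índices no 0, para efeiros de cáculo subtrai-se 1.
--     return (pos - 1) // n
-- ===== SOURCE B (Python) =====
-- def obtem_diagonal(tab, pos):
--     """Closed-form: compute the diagonal start and its length, then generate it directly."""
--     m, n = len(tab), len(tab[0])
--     linha, col = divmod(pos - 1, n)
--     if linha >= col: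
--         linha, col = linha - col, 0
--     else:
--         linha, col = 0, col - linha
--     start = linha * n + col + 1
--     k_col = (-start) % n
--     k_row = max(0, (n * (m - 1) - start) // (n + 1) + 1)
--     count = 1 + min(k_col, k_row)
--     return tuple(start + k * (n + 1) for k in range(count))
-- ===== Notes on version B (the rewrite author's own statement) =====
-- stated objective: simpler
-- what changed: B replaces A's while-loop that grows a tuple and re-tests last-row/last-column conditions on its last element by a closed-form length (min of distance-to-last-column and distance-to-last-row, computed with one mod and one floor division) and a single comprehension generating the diagonal directly.
import Mathlib
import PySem

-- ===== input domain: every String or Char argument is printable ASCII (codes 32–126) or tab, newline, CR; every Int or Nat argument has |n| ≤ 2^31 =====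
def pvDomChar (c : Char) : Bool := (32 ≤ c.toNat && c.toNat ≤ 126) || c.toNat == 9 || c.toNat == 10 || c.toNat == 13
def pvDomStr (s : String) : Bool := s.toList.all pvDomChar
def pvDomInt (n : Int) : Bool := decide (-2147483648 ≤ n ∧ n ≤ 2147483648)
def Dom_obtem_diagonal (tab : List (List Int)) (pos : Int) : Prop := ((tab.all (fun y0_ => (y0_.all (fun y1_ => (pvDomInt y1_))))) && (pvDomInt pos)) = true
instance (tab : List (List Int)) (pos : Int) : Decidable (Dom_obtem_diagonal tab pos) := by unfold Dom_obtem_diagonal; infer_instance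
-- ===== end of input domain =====

-- B replaces A's grow-and-retest while loop by a closed-form diagonal length plus one generating comprehension (simpler).


-- ===== PORT A =====
-- len(tab[0]) raises IndexError on tab = []: Pre_ excludes that (the 0 default is never reached inside Pre_).
def obtem_dimensao (tab : List (List Int)) : Int × Int :=
  let m : Int := tab.length
  let n : Int := match PySem.List.pyGet? tab 0 with
    | some r => (r.length : Int)
    | none => 0
  (m, n)

def qual_coluna (tab : List (List Int)) (pos : Int) : Int :=
  let n := (obtem_dimensao tab).2
  PySem.Int.mod (pos - 1) n

def qual_linha (tab : List (List Int)) (pos : Int) : Int :=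
  let n := (obtem_dimensao tab).2
  PySem.Int.floordiv (pos - 1) n

-- termination of A's while loop: each step adds n+1 and the guard bounds last (proof below the ports)
theorem pvDiagMeasure (m n last : Int) (h1 : last ≤ n * (m - 1)) (h2 : 0 < PySem.Int.mod last n) :
    (n * (m - 1) + 1 - (last + n + 1)).toNat < (n * (m - 1) + 1 - last).toNat := by
  rcases lt_trichotomy n 0 with hn | hn | hn
  · exfalso
    have hneg : PySem.Int.mod last n = - PySem.Int.mod (-last) (-n) := by
      have h := PySem.Int.mod_neg_neg (-last) (-n)
      simpa using h
    have hpos : (0:Int) < -n := by omega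
    have h0 : PySem.Int.mod (-last) (-n) = (-last) % (-n) := PySem.Int.mod_eq_emod_of_pos hpos
    have h1' : 0 ≤ (-last) % (-n) := Int.emod_nonneg _ (by omega)
    rw [hneg, h0] at h2
    omega
  · subst hn
    simp only [PySem.Int.mod, Int.fmod_zero] at h2
    simp only [zero_mul] at h1
    omega
  · omega

-- A's while loop: diag grows at the end, the guard reads its last element (carried here as `last`)
def diagLoop (m n : Int) (diag : List Int) (last : Int) : List Int :=
  if h : last ≤ n * (m - 1) ∧ 0 < PySem.Int.mod last n then
    diagLoop m n (diag ++ [last + n + 1]) (last + n + 1)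
  else diag
termination_by (n * (m - 1) + 1 - last).toNat
decreasing_by exact pvDiagMeasure m n last h.1 h.2

def obtem_diagonal (tab : List (List Int)) (pos : Int) : List Int :=
  let mn := obtem_dimensao tab
  let m := mn.1
  let n := mn.2
  let linha := qual_linha tab pos
  let col := qual_coluna tab pos
  let lc : Int × Int := if linha ≥ col then (linha - col, 0) else (0, col - linha)
  let start := lc.1 * n + lc.2 + 1
  diagLoop m n [start] start

-- ===== PORT B =====
def obtem_diagonal_alt (tab : List (List Int)) (pos : Int) : List Int :=
  let m : Int := tab.length
  let n : Int := match PySem.List.pyGet? tab 0 with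
    | some r => (r.length : Int)
    | none => 0
  let linha := PySem.Int.floordiv (pos - 1) n
  let col := PySem.Int.mod (pos - 1) n
  let lc : Int × Int := if linha ≥ col then (linha - col, 0) else (0, col - linha)
  let start := lc.1 * n + lc.2 + 1
  let k_col := PySem.Int.mod (-start) n
  let k_row := max 0 (PySem.Int.floordiv (n * (m - 1) - start) (n + 1) + 1)
  let count := 1 + min k_col k_row
  (PySem.List.pyRange 0 count 1).map (fun k => start + k * (n + 1))

-- ===== PRECONDITION & SPEC =====
-- Pre_ excludes exactly the inputs where Python A raises: tab = [] (IndexError on tab[0])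
-- and tab with an empty first row (ZeroDivisionError in (pos-1) % n).
def Pre_obtem_diagonal (tab : List (List Int)) (pos : Int) : Prop :=
  0 < tab.length ∧ 0 < tab.headI.length
instance (tab : List (List Int)) (pos : Int) : Decidable (Pre_obtem_diagonal tab pos) := by unfold Pre_obtem_diagonal; infer_instance

def pvWitness_obtem_diagonal : List (List Int) × Int := ([[1, 2], [3, 4]], 2)

def Spec_obtem_diagonal (tab : List (List Int)) (pos : Int) (out : List Int) : Prop := out = obtem_diagonal_alt tab pos
instance (tab : List (List Int)) (pos : Int) (out : List Int) : Decidable (Spec_obtem_diagonal tab pos out) := by unfold Spec_obtem_diagonal; infer_instance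

-- ===== CLAIM (what is proved, stated in full; the proofs are below) =====
def Claim_equal_obtem_diagonal : Prop := ∀ (tab : List (List Int)) (pos : Int), Dom_obtem_diagonal tab pos → Pre_obtem_diagonal tab pos → Spec_obtem_diagonal tab pos (obtem_diagonal tab pos)

-- ===== LEMMAS AND PROOFS =====

-- the closed-form count of B, as an Int
def cntI (m n start : Int) : Int :=
  min (PySem.Int.mod (-start) n) (max 0 (PySem.Int.floordiv (n * (m - 1) - start) (n + 1) + 1))

theorem cntI_nonneg (m n start : Int) (hn : 0 < n) : 0 ≤ cntI m n start := by
  unfold cntI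
  have h0 : PySem.Int.mod (-start) n = (-start) % n := PySem.Int.mod_eq_emod_of_pos hn
  have h1 : 0 ≤ (-start) % n := Int.emod_nonneg _ (by omega)
  omega

theorem guard_iff (m n start : Int) (hn : 0 < n) :
    (start ≤ n * (m - 1) ∧ 0 < PySem.Int.mod start n) ↔ 0 < cntI m n start := by
  unfold cntI
  have hkc : (0 < PySem.Int.mod start n) ↔ (0 < PySem.Int.mod (-start) n) := by
    have e1 : PySem.Int.mod start n = 0 ↔ n ∣ start := PySem.Int.mod_eq_zero_iff_dvd start n
    have e2 : PySem.Int.mod (-start) n = 0 ↔ n ∣ (-start) := PySem.Int.mod_eq_zero_iff_dvd (-start) n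
    have e3 : n ∣ (-start) ↔ n ∣ start := dvd_neg
    have p1 : 0 ≤ PySem.Int.mod start n := by
      rw [PySem.Int.mod_eq_emod_of_pos hn]; exact Int.emod_nonneg _ (by omega)
    have p2 : 0 ≤ PySem.Int.mod (-start) n := by
      rw [PySem.Int.mod_eq_emod_of_pos hn]; exact Int.emod_nonneg _ (by omega)
    constructor
    · intro h; rcases p2.lt_or_eq with h2 | h2; · exact h2
      · exfalso; exact absurd (e1.mpr (e3.mp (e2.mp h2.symm))) (by omega)
    · intro h; rcases p1.lt_or_eq with h2 | h2; · exact h2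
      · exfalso; exact absurd (e2.mpr (e3.mpr (e1.mp h2.symm))) (by omega)
  have hkr : (start ≤ n * (m - 1)) ↔ 0 < max 0 (PySem.Int.floordiv (n * (m - 1) - start) (n + 1) + 1) := by
    have hle : (0 ≤ PySem.Int.floordiv (n * (m - 1) - start) (n + 1)) ↔ 0 * (n + 1) ≤ n * (m - 1) - start :=
      PySem.Int.le_floordiv_iff_mul_le (by omega)
    simp only [zero_mul] at hle
    omega
  omega

theorem cnt_step (m n start : Int) (hn : 0 < n)
    (h1 : start ≤ n * (m - 1)) (h2 : 0 < PySem.Int.mod start n) :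
    cntI m n start = cntI m n (start + n + 1) + 1 := by
  have hg := (guard_iff m n start hn).mp ⟨h1, h2⟩
  unfold cntI at hg ⊢
  -- column part
  have hmodeq : ∀ a : Int, PySem.Int.mod a n = a % n := fun a => PySem.Int.mod_eq_emod_of_pos hn
  have hkcstep : PySem.Int.mod (-(start + n + 1)) n = PySem.Int.mod (-start) n - 1 := by
    rw [hmodeq, hmodeq]
    have e1 : (-(start + n + 1)) % n = (-start - 1) % n := by
      rw [show -(start + n + 1) = (-start - 1) - n by ring, Int.sub_emod_right]
    set r := (-start) % n with hr
    have hrpos : 0 < r := by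
      have := (guard_iff m n start hn).mp ⟨h1, h2⟩
      unfold cntI at this
      rw [hmodeq] at this
      omega
    have hrlt : r < n := Int.emod_lt_of_pos _ hn
    have e2 : (-start - 1) % n = (r - 1) % n := by
      have hd : -start - 1 = (r - 1) + n * ((-start) / n) := by
        have := Int.emod_add_ediv (-start) n
        rw [← hr] at this
        linarith [this]
      rw [hd, Int.add_mul_emod_self_left]
    have e3 : (r - 1) % n = r - 1 := Int.emod_eq_of_lt (by omega) (by omega)
    rw [e1, e2, e3]
  -- row part
  have hkrstep : PySem.Int.floordiv (n * (m - 1) - (start + n + 1)) (n + 1) + 1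
      = PySem.Int.floordiv (n * (m - 1) - start) (n + 1) := by
    rw [PySem.Int.floordiv_eq_ediv_of_pos (by omega), PySem.Int.floordiv_eq_ediv_of_pos (by omega)]
    have : n * (m - 1) - (start + n + 1) = (n * (m - 1) - start) + (-1) * (n + 1) := by ring
    rw [this, Int.add_mul_ediv_right _ _ (by omega : n + 1 ≠ 0)]
    omega
  have hkrpos : 0 < max 0 (PySem.Int.floordiv (n * (m - 1) - start) (n + 1) + 1) := by
    have := (guard_iff m n start hn).mp ⟨h1, h2⟩
    unfold cntI at this
    omega
  omega

theorem diagLoop_eq (m n : Int) (hn : 0 < n) : ∀ (last : Int) (diag : List Int),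
    diagLoop m n diag last
      = diag ++ (List.range (cntI m n last).toNat).map (fun (k : Nat) => last + ((k : Int) + 1) * (n + 1)) := by
  intro last diag
  generalize hN : (n * (m - 1) + 1 - last).toNat = N
  induction N using Nat.strong_induction_on generalizing last diag with
  | _ N ih =>
    rw [diagLoop]
    split_ifs with hg
    · obtain ⟨h1, h2⟩ := hg
      have hstep := cnt_step m n last hn h1 h2
      have hdec := pvDiagMeasure m n last h1 h2
      rw [ih _ (by omega) (last + n + 1) (diag ++ [last + n + 1]) rfl]
      have hcnt : (cntI m n last).toNat = (cntI m n (last + n + 1)).toNat + 1 := by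
        have := cntI_nonneg m n (last + n + 1) hn
        omega
      rw [hcnt, List.range_succ_eq_map, List.map_cons, List.map_map, List.append_assoc]
      congr 1
      simp only [Nat.cast_zero, List.cons_append, List.nil_append]
      congr 1
      · ring
      · apply List.map_congr_left
        intro k _
        simp only [Function.comp_apply, Nat.succ_eq_add_one]
        push_cast
        ring
    · have hz : cntI m n last ≤ 0 := by
        by_contra hc
        exact hg ((guard_iff m n last hn).mpr (by omega))
      rw [show (cntI m n last).toNat = 0 by omega]
      simp

-- ===== VERDICT (by name: the statement is the Claim_ definition above) =====
theorem obtem_diagonal_spec : Claim_equal_obtem_diagonal := by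
  intro tab pos _ hpre
  obtain ⟨hm, hn0⟩ := hpre
  obtain ⟨r, rest, rfl⟩ : ∃ r rest, tab = r :: rest := by
    cases tab with
    | nil => simp at hm
    | cons r rest => exact ⟨r, rest, rfl⟩
  simp only [List.headI] at hn0
  have hget : PySem.List.pyGet? (r :: rest) 0 = some r := by
    simp [PySem.List.pyGet?, PySem.List.pyIdx?]
  unfold Spec_obtem_diagonal obtem_diagonal obtem_diagonal_alt qual_linha qual_coluna
  unfold obtem_dimensao
  simp only [hget]
  set n : Int := (r.length : Int) with hndef
  have hn : 0 < n := by rw [hndef]; exact_mod_cast hn0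
  set m : Int := ((r :: rest).length : Int) with hmdef
  set linha := PySem.Int.floordiv (pos - 1) n with hlinha
  set col := PySem.Int.mod (pos - 1) n with hcol
  set lc : Int × Int := if linha ≥ col then (linha - col, 0) else (0, col - linha) with hlc
  set start := lc.1 * n + lc.2 + 1 with hstart
  rw [diagLoop_eq m n hn start [start]]
  have hcnt0 : 0 ≤ cntI m n start := cntI_nonneg m n start hn
  rw [PySem.List.pyRange_one]
  have hlen : (1 + min (PySem.Int.mod (-start) n)
      (max 0 (PySem.Int.floordiv (n * (m - 1) - start) (n + 1) + 1)) - 0).toNat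
      = (cntI m n start).toNat + 1 := by
    unfold cntI at hcnt0 ⊢
    omega
  rw [hlen, List.range_succ_eq_map, List.map_cons, List.map_cons, List.map_map, List.map_map]
  simp only [List.singleton_append, Nat.cast_zero, Function.comp_apply]
  congr 1
  · ring
  · apply List.map_congr_left
    intro k _
    simp only [Function.comp_apply, Nat.succ_eq_add_one]
    push_cast
    ring
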